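-- pv_equiv track=rewrite | github.com/Tianyi-Billy-Ma/Halluc | llmhalluc/models/helper.py | backtrack_generation
-- ===== SOURCE A (Python) =====
-- def backtrack_generation(
--     token_ids: list[int],
--     backtrack_token_id: int,
--     backtrack_count: int = 0,
-- ):
--     generated_token_ids, backtrack_count = [], 0
--     for token_id in token_ids:
--         if token_id == backtrack_token_id:
--             backtrack_count += 1
--         else:
--             generated_token_ids = (
--                 generated_token_ids[:-backtrack_count]
--                 if backtrack_count > 0
--                 else generated_token_ids
--             )
--             generated_token_ids.append(token_id)
--             backtrack_count = 0
--     return generated_token_ids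
-- ===== SOURCE B (Python) =====
-- def backtrack_generation(
--     token_ids: list[int],
--     backtrack_token_id: int,
--     backtrack_count: int = 0,
-- ):
--     # Stage 1: trailing backtrack tokens never take effect; drop them.
--     n = len(token_ids)
--     while n and token_ids[n - 1] == backtrack_token_id:
--         n -= 1
--     # Stage 2: stack pass; each backtrack token pops one kept token right away
--     # (popping an empty stack is a no-op, matching slice clamping).
--     out = []
--     for t in token_ids[:n]:
--         if t == backtrack_token_id:
--             if out:
--                 out.pop()
--         else:
--             out.append(t)
--     return out
-- ===== Notes on version B (the rewrite author's own statement) =====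
-- stated objective: alternative
-- what changed: Replaced A's one-pass counter with deferred slice truncation by a two-stage algorithm: first strip the trailing run of backtrack tokens, then a stack pass where every backtrack token immediately pops one kept token (no counter, no slicing).
import Mathlib
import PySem

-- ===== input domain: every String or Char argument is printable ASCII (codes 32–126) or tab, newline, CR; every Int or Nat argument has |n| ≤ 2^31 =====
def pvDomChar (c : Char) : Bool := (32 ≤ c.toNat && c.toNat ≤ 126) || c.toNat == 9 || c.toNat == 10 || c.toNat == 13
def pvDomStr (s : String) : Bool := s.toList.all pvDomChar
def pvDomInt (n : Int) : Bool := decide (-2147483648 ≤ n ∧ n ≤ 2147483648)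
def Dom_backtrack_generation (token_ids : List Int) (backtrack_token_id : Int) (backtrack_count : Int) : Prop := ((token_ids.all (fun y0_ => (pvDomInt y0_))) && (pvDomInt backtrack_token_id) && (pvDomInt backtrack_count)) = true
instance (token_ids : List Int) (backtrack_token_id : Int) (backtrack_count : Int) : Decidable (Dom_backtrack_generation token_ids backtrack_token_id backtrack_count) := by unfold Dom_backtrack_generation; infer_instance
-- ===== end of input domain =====

-- B replaces A's counter-with-deferred-slice-truncation pass by two stages:
-- strip trailing backtrack tokens, then a stack pass with immediate pop
-- (objective: alternative; return value only, no mutation).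

-- ===== PORT A =====
-- loop body of A: state = (generated_token_ids, backtrack_count)
def stepA (bt : Int) (s : List Int × Int) (t : Int) : List Int × Int :=
  if t == bt then (s.1, s.2 + 1)
  else ((if s.2 > 0 then PySem.List.slice s.1 none (some (-s.2)) else s.1) ++ [t], 0)

def backtrack_generation (token_ids : List Int) (backtrack_token_id : Int) (backtrack_count : Int) : List Int :=
  (token_ids.foldl (stepA backtrack_token_id) ([], 0)).1

-- ===== PORT B =====
-- Source B stage 1: the while loop dropping trailing backtrack tokens
def stripTrail (bt : Int) (xs : List Int) : List Int :=
  (xs.reverse.dropWhile (· == bt)).reverse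

-- Source B stage 2 loop body: `out` is kept most-recent-first (Python's append/pop
-- at the list end = cons/tail here; the result is reversed once at return)
def stepB (bt : Int) (st : List Int) (t : Int) : List Int :=
  if t == bt then st.tail else t :: st

def backtrack_generation_alt (token_ids : List Int) (backtrack_token_id : Int) (backtrack_count : Int) : List Int :=
  ((stripTrail backtrack_token_id token_ids).foldl (stepB backtrack_token_id) []).reverse

-- ===== PRECONDITION & SPEC =====
def Spec_backtrack_generation (token_ids : List Int) (backtrack_token_id : Int) (backtrack_count : Int) (out : List Int) : Prop := out = backtrack_generation_alt token_ids backtrack_token_id backtrack_count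
instance (token_ids : List Int) (backtrack_token_id : Int) (backtrack_count : Int) (out : List Int) : Decidable (Spec_backtrack_generation token_ids backtrack_token_id backtrack_count out) := by unfold Spec_backtrack_generation; infer_instance

-- ===== CLAIM (what is proved, stated in full; the proofs are below) =====
def Claim_equal_backtrack_generation : Prop := ∀ (token_ids : List Int) (backtrack_token_id : Int) (backtrack_count : Int), Dom_backtrack_generation token_ids backtrack_token_id backtrack_count → Spec_backtrack_generation token_ids backtrack_token_id backtrack_count (backtrack_generation token_ids backtrack_token_id backtrack_count)

-- ===== LEMMAS AND PROOFS =====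

-- A's truncation branch, uniformly for 0 ≤ c
lemma truncA_eq (g : List Int) (c : Int) (hc : 0 ≤ c) :
    (if c > 0 then PySem.List.slice g none (some (-c)) else g) = g.take (g.length - c.toNat) := by
  split
  · have hk : 0 < c.toNat := by omega
    have hcc : c = ((c.toNat : Nat) : Int) := by omega
    rw [hcc, PySem.List.slice_to_neg_natCast _ _ hk]
    congr 1
  · have : c = 0 := by omega
    simp [this]

-- steps of A on a backtrack token leave the kept list unchanged
lemma foldA_all_bt (bt : Int) (zs : List Int) (s : List Int × Int)
    (h : ∀ t ∈ zs, t = bt) : (zs.foldl (stepA bt) s).1 = s.1 := by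
  induction zs generalizing s with
  | nil => rfl
  | cons t zs ih =>
    have ht := h t (by simp)
    simp only [List.foldl_cons]
    rw [ih _ (fun u hu => h u (by simp [hu]))]
    simp [stepA, ht]

-- A's counter is 0 after processing a list ending in a non-backtrack token
lemma foldA_last_ne (bt : Int) (ys : List Int) (t : Int) (ht : ¬ t = bt) (s : List Int × Int) :
    ((ys ++ [t]).foldl (stepA bt) s).2 = 0 := by
  rw [List.foldl_append]
  simp [stepA, ht]

-- main invariant linking B's stack to A's (list, counter) state
lemma stackB (bt : Int) (xs : List Int) (g st : List Int) (c : Int) (hc : 0 ≤ c)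
    (hst : st.reverse = g.take (g.length - c.toNat)) :
    (xs.foldl (stepB bt) st).reverse
      = (xs.foldl (stepA bt) (g, c)).1.take
          ((xs.foldl (stepA bt) (g, c)).1.length - (xs.foldl (stepA bt) (g, c)).2.toNat) := by
  induction xs generalizing g st c with
  | nil => simpa using hst
  | cons t xs ih
  · simp only [List.foldl_cons]
    by_cases ht : t = bt
    · have hB : stepB bt st t = st.tail := by simp [stepB, ht]
      have hA : stepA bt (g, c) t = (g, c + 1) := by simp [stepA, ht]
      rw [hB, hA]
      apply ih g st.tail (c + 1) (by omega)
      rw [← List.dropLast_reverse, hst, List.dropLast_eq_take, List.take_take,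
        List.length_take]
      congr 1
      omega
    · have hB : stepB bt st t = t :: st := by simp [stepB, ht]
      have hA : stepA bt (g, c) t = (g.take (g.length - c.toNat) ++ [t], 0) := by
        simp only [stepA]
        rw [if_neg (by simp [ht]), truncA_eq g c hc]
      rw [hB, hA]
      apply ih _ _ 0 (by omega)
      simp [hst]

-- ===== VERDICT (by name: the statement is the Claim_ definition above) =====
theorem backtrack_generation_spec : Claim_equal_backtrack_generation := by
  intro token_ids bt _ _
  unfold Spec_backtrack_generation backtrack_generation backtrack_generation_alt
  -- decompose the input into the stripped part and the trailing backtrack run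
  have hdecomp : token_ids = stripTrail bt token_ids
      ++ (token_ids.reverse.takeWhile (· == bt)).reverse := by
    unfold stripTrail
    conv_lhs => rw [← List.reverse_reverse token_ids,
      ← List.takeWhile_append_dropWhile (p := (· == bt)) (l := token_ids.reverse)]
    rw [List.reverse_append]
  have hzs : ∀ t ∈ (token_ids.reverse.takeWhile (· == bt)).reverse, t = bt := by
    intro t ht
    rw [List.mem_reverse] at ht
    simpa using List.mem_takeWhile_imp ht
  conv_lhs => rw [hdecomp]
  rw [List.foldl_append, foldA_all_bt bt _ _ hzs,
    stackB bt (stripTrail bt token_ids) [] [] 0 le_rfl (by simp)]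
  -- A's counter is 0 after the stripped part, so the final `take` is the identity
  rcases hD : token_ids.reverse.dropWhile (· == bt) with _ | ⟨h, tl⟩
  · simp [stripTrail, hD]
  · have hh : ¬ h = bt := by
      have := List.head_dropWhile_not (p := (· == bt)) (l := token_ids.reverse)
        (by rw [hD]; simp)
      simp only [hD, List.head_cons] at this
      simpa using this
    have hys : stripTrail bt token_ids = tl.reverse ++ [h] := by
      simp [stripTrail, hD]
    rw [hys, foldA_last_ne bt tl.reverse h hh]
    simp
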